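-- pv_equiv track=rewrite | github.com/Dospacite/PatchesPuzzleGenerator | src/patches_puzzle_creator/generate_patches.py | factor_dimensions
-- ===== SOURCE A (Python) =====
-- import math
--
-- ShapeClass = str
--
-- def classify_shape(width: int, height: int) -> ShapeClass:
--     if width == height:
--         return "square"
--     if width > height:
--         return "wide"
--     return "tall"
--
-- def factor_dimensions(area: int, shape: ShapeClass) -> list[tuple[int, int]]:
--     dims: list[tuple[int, int]] = []
--     limit = int(math.isqrt(area))
--     for height in range(1, limit + 1):
--         if area % height != 0:
--             continue
--         width = area // height
--         rect_shape = classify_shape(width, height)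
--         if rect_shape == shape:
--             dims.append((height, width))
--         if width != height:
--             rect_shape_swapped = classify_shape(height, width)
--             if rect_shape_swapped == shape:
--                 dims.append((width, height))
--     dims = sorted(set(dims))
--     return dims
-- ===== SOURCE B (Python) =====
-- def factor_dimensions(area: int, shape: str) -> list[tuple[int, int]]:
--     if area <= 0:
--         return []
--     # build the full divisor list by prime factorisation
--     divs = [1]
--     n = area
--     p = 2
--     while p * p <= n:
--         if n % p == 0:
--             block = divs
--             while n % p == 0:
--                 n //= p
--                 block = [d * p for d in block]
--                 divs = divs + block
--         p += 1
--     if n > 1: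
--         divs = divs + [d * n for d in divs]
--     # select the orientation asked for
--     result = []
--     for h in divs:
--         w = area // h
--         if shape == "square":
--             if h == w:
--                 result.append((h, w))
--         elif shape == "wide":
--             if h < w:
--                 result.append((h, w))
--         elif shape == "tall":
--             if w < h:
--                 result.append((h, w))
--     return sorted(result)
-- ===== Notes on version B (the rewrite author's own statement) =====
-- stated objective: alternative
-- what changed: B replaces A's trial-division scan of every h up to isqrt(area) (classifying both orientations of each rectangle and deduplicating with sorted(set())) by prime factorisation: it builds the complete divisor list multiplicatively from the prime factors, then one selection pass keeps the orientation the requested shape asks for.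
import Mathlib
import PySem

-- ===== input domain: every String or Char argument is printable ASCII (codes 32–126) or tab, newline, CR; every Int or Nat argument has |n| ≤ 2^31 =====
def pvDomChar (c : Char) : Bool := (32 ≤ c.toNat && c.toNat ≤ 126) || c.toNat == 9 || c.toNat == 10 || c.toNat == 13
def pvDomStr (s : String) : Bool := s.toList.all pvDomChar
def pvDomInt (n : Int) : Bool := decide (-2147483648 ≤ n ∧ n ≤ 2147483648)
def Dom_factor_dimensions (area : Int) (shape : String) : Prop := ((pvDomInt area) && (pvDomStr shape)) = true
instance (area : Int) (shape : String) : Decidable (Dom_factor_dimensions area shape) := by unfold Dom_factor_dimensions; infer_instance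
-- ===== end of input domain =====

-- B replaces A's trial-division scan up to isqrt(area) by prime factorisation: it builds the
-- complete divisor list multiplicatively, then one selection pass keeps the requested orientation.

-- ===== PORT A =====
def classify_shape (width height : Int) : String :=
  if width == height then "square"
  else if height < width then "wide"
  else "tall"

def factor_dimensions (area : Int) (shape : String) : List (Int × Int) :=
  -- int(math.isqrt(area)); exact for area ≥ 0 (Pre_); math.isqrt raises ValueError for area < 0
  let limit : Int := (Nat.sqrt area.toNat : Int)
  let dims : List (Int × Int) :=
    (PySem.List.pyRange 1 (limit + 1) 1).foldl (fun dims height =>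
      if PySem.Int.mod area height ≠ 0 then dims
      else
        let width := PySem.Int.floordiv area height
        let dims := if classify_shape width height == shape then dims ++ [(height, width)] else dims
        if width ≠ height then
          if classify_shape height width == shape then dims ++ [(width, height)] else dims
        else dims) []
  PySem.List.sorted2 (PySem.Set.ofList dims) (·.1) (·.2)

-- ===== PORT B =====
-- inner `while n % p == 0` loop of Source B; the fuel argument is a totality guard only
-- (callers pass enough fuel that it never runs out while the Python loop would still run)
def pvPump : Nat → Int → Int → List Int → List Int → Int × List Int
  | 0, _, n, divs, _ => (n, divs)
  | (fuel+1), p, n, divs, block =>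
    if PySem.Int.mod n p = 0 then
      pvPump fuel p (PySem.Int.floordiv n p) (divs ++ block.map (· * p)) (block.map (· * p))
    else (n, divs)

-- outer `while p * p <= n` loop of Source B plus the trailing `if n > 1` block; fuel as above
def pvFac : Nat → Int → Int → List Int → List Int
  | 0, _, n, divs => if 1 < n then divs ++ divs.map (· * n) else divs
  | (fuel+1), p, n, divs =>
    if p * p ≤ n then
      if PySem.Int.mod n p = 0 then
        let r := pvPump n.toNat p n divs divs
        pvFac fuel (p + 1) r.1 r.2
      else pvFac fuel (p + 1) n divs
    else if 1 < n then divs ++ divs.map (· * n) else divs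

def factor_dimensions_alt (area : Int) (shape : String) : List (Int × Int) :=
  if area ≤ 0 then []
  else
    let divs := pvFac (area.toNat + 1) 2 area [1]
    let result : List (Int × Int) :=
      divs.foldl (fun result h =>
        let w := PySem.Int.floordiv area h
        if shape == "square" then
          if h == w then result ++ [(h, w)] else result
        else if shape == "wide" then
          if h < w then result ++ [(h, w)] else result
        else if shape == "tall" then
          if w < h then result ++ [(h, w)] else result
        else result) []
    PySem.List.sorted2 result (·.1) (·.2)

-- ===== PRECONDITION & SPEC =====
-- Pre_ excludes area < 0, on which A (math.isqrt) raises ValueError.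
def Pre_factor_dimensions (area : Int) (shape : String) : Prop := 0 ≤ area
instance (area : Int) (shape : String) : Decidable (Pre_factor_dimensions area shape) := by unfold Pre_factor_dimensions; infer_instance
def pvWitness_factor_dimensions : Int × String := (12, "wide")

def Spec_factor_dimensions (area : Int) (shape : String) (out : List (Int × Int)) : Prop := out = factor_dimensions_alt area shape
instance (area : Int) (shape : String) (out : List (Int × Int)) : Decidable (Spec_factor_dimensions area shape out) := by unfold Spec_factor_dimensions; infer_instance

-- ===== CLAIM (what is proved, stated in full; the proofs are below) =====
def Claim_equal_factor_dimensions : Prop := ∀ (area : Int) (shape : String), Dom_factor_dimensions area shape → Pre_factor_dimensions area shape → Spec_factor_dimensions area shape (factor_dimensions area shape)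

-- ===== LEMMAS AND PROOFS =====

theorem pvPump_spec_aux (N : Nat) : ∀ (p n : Int) (divs block : List Int) (m0 : Int) (j : Nat),
    n.toNat ≤ N → Prime p → 2 ≤ p → 0 < n → 0 < m0 → ¬ p ∣ m0 →
    (∀ d, d ∈ divs ↔ 0 < d ∧ d ∣ m0 * p ^ j) →
    (∀ d, d ∈ block ↔ ∃ e, 0 < e ∧ e ∣ m0 ∧ d = e * p ^ j) →
    divs.Nodup → block.Nodup →
    ∃ k : Nat, (pvPump N p n divs block).1 * p ^ k = n ∧ 0 < (pvPump N p n divs block).1 ∧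
      ¬ p ∣ (pvPump N p n divs block).1 ∧
      (∀ d, d ∈ (pvPump N p n divs block).2 ↔ 0 < d ∧ d ∣ m0 * p ^ (j + k)) ∧
      (pvPump N p n divs block).2.Nodup := by
  induction N with
  | zero => intro p n divs block m0 j hN hp hp2 hn; omega
  | succ N ih =>
    intro p n divs block m0 j hN hp hp2 hn hm0 hpm0 hd hb hndd hndb
    have hp0 : (0:Int) < p := by omega
    have hpz : p ≠ 0 := by omega
    by_cases hcond : PySem.Int.mod n p = 0
    · simp only [pvPump, if_pos hcond]
      obtain ⟨c, hc⟩ := Int.dvd_of_fmod_eq_zero hcond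
      have hceq : PySem.Int.floordiv n p = c := by
        simp only [PySem.Int.floordiv, hc, Int.mul_fdiv_cancel_left _ hpz]
      have hc0 : 0 < c := by nlinarith
      have hcn : c < n := by nlinarith
      -- hypotheses at exponent j+1
      have hb' : ∀ d, d ∈ block.map (· * p) ↔ ∃ e, 0 < e ∧ e ∣ m0 ∧ d = e * p ^ (j+1) := by
        intro d
        rw [List.mem_map]
        constructor
        · rintro ⟨b, hbmem, rfl⟩
          obtain ⟨e, he0, hem, rfl⟩ := (hb b).mp hbmem
          exact ⟨e, he0, hem, by ring⟩
        · rintro ⟨e, he0, hem, rfl⟩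
          exact ⟨e * p ^ j, (hb _).mpr ⟨e, he0, hem, rfl⟩, by ring⟩
      have hd' : ∀ d, d ∈ divs ++ block.map (· * p) ↔ 0 < d ∧ d ∣ m0 * p ^ (j+1) := by
        intro d
        rw [List.mem_append]
        constructor
        · rintro (hmem | hmem)
          · obtain ⟨h0, hdvd⟩ := (hd d).mp hmem
            exact ⟨h0, hdvd.trans (by rw [pow_succ, ← mul_assoc]; exact Dvd.intro p rfl)⟩
          · obtain ⟨e, he0, hem, rfl⟩ := (hb' d).mp hmem
            refine ⟨by positivity, mul_dvd_mul hem dvd_rfl⟩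
        · rintro ⟨h0, hdvd⟩
          obtain ⟨d1, d2, h1m, h2p, heq⟩ := exists_dvd_and_dvd_of_dvd_mul hdvd
          have h1m' : |d1| ∣ m0 := (abs_dvd _ _).mpr h1m
          have h2p' : |d2| ∣ p ^ (j+1) := (abs_dvd _ _).mpr h2p
          have hdabs : d = |d1| * |d2| := by
            rw [← abs_mul, ← heq, abs_of_pos h0]
          have h2pos : 0 < |d2| := by
            rcases lt_or_eq_of_le (abs_nonneg d2) with h | h
            · exact h
            · exfalso; rw [← h] at hdabs; simp at hdabs; omega
          have h1pos : 0 < |d1| := by nlinarith [abs_nonneg d1]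
          obtain ⟨i, hi, hassoc⟩ := (dvd_prime_pow hp (j+1)).mp h2p'
          have hpi : |d2| = p ^ i := by
            rcases Int.associated_iff.mp hassoc with h | h
            · exact h
            · exfalso
              have : (0:Int) < p ^ i := by positivity
              omega
          rcases Nat.lt_or_ge i (j+1) with hij | hij
          · left
            refine (hd d).mpr ⟨h0, ?_⟩
            rw [hdabs, hpi]
            exact mul_dvd_mul h1m' (pow_dvd_pow p (by omega))
          · right
            have hieq : i = j + 1 := by omega
            refine (hb' d).mpr ⟨|d1|, h1pos, h1m', ?_⟩
            rw [hdabs, hpi, hieq]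
      have hnd' : (divs ++ block.map (· * p)).Nodup := by
        refine List.Nodup.append hndd (hndb.map fun x y hxy => mul_right_cancel₀ hpz hxy) ?_
        intro a ha hamem
        obtain ⟨e, he0, hem, rfl⟩ := (hb' a).mp hamem
        obtain ⟨-, hdvd⟩ := (hd _).mp ha
        have h1 : p ^ (j+1) ∣ m0 * p ^ j := dvd_trans (Dvd.intro_left e rfl) hdvd
        rw [pow_succ, mul_comm m0 (p ^ j)] at h1
        exact hpm0 ((mul_dvd_mul_iff_left (pow_ne_zero j hpz)).mp h1)
      have hrec := ih p c (divs ++ block.map (· * p)) (block.map (· * p)) m0 (j+1)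
        (by omega) hp hp2 hc0 hm0 hpm0 hd' hb' hnd' (hndb.map fun x y hxy => mul_right_cancel₀ hpz hxy)
      obtain ⟨k, h1, h2, h3, h4, h5⟩ := hrec
      refine ⟨k + 1, ?_, ?_, ?_, ?_, ?_⟩
      · show (pvPump N p (PySem.Int.floordiv n p) (divs ++ block.map (· * p)) (block.map (· * p))).1 * p ^ (k+1) = n
        rw [hceq] at *
        rw [pow_succ, ← mul_assoc, h1, hc, mul_comm]
      · show 0 < (pvPump N p (PySem.Int.floordiv n p) (divs ++ block.map (· * p)) (block.map (· * p))).1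
        rw [hceq]; exact h2
      · show ¬ p ∣ (pvPump N p (PySem.Int.floordiv n p) (divs ++ block.map (· * p)) (block.map (· * p))).1
        rw [hceq]; exact h3
      · show ∀ d, d ∈ (pvPump N p (PySem.Int.floordiv n p) (divs ++ block.map (· * p)) (block.map (· * p))).2 ↔
          0 < d ∧ d ∣ m0 * p ^ (j + (k+1))
        rw [hceq]
        have : j + (k + 1) = (j + 1) + k := by omega
        rw [this]; exact h4
      · show (pvPump N p (PySem.Int.floordiv n p) (divs ++ block.map (· * p)) (block.map (· * p))).2.Nodup
        rw [hceq]; exact h5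
    · simp only [pvPump, if_neg hcond]
      refine ⟨0, by simp, hn, ?_, by simpa using hd, hndd⟩
      intro hdvd
      exact hcond (Int.fmod_eq_zero_of_dvd hdvd)

theorem pvPump_spec (p n : Int) (divs block : List Int) (m0 : Int) (j : Nat)
    (hp : Prime p) (hp2 : 2 ≤ p) (hn : 0 < n) (hm0 : 0 < m0) (hpm0 : ¬ p ∣ m0)
    (hd : ∀ d, d ∈ divs ↔ 0 < d ∧ d ∣ m0 * p ^ j)
    (hb : ∀ d, d ∈ block ↔ ∃ e, 0 < e ∧ e ∣ m0 ∧ d = e * p ^ j)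
    (hndd : divs.Nodup) (hndb : block.Nodup) :
    ∃ k : Nat, (pvPump n.toNat p n divs block).1 * p ^ k = n ∧ 0 < (pvPump n.toNat p n divs block).1 ∧
      ¬ p ∣ (pvPump n.toNat p n divs block).1 ∧
      (∀ d, d ∈ (pvPump n.toNat p n divs block).2 ↔ 0 < d ∧ d ∣ m0 * p ^ (j + k)) ∧
      (pvPump n.toNat p n divs block).2.Nodup :=
  pvPump_spec_aux n.toNat p n divs block m0 j (le_refl _) hp hp2 hn hm0 hpm0 hd hb hndd hndb

-- p is prime whenever p ∣ n and every divisor ≥ 2 of n is ≥ p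
theorem pvPrime_of_min (p n : Int) (hp2 : 2 ≤ p) (hn : 0 < n) (hdvd : p ∣ n)
    (hmin : ∀ q, 2 ≤ q → q ∣ n → p ≤ q) : Prime p := by
  rw [Int.prime_iff_natAbs_prime]
  by_contra hnp
  have hpa : 2 ≤ p.natAbs := by omega
  have hr := Nat.minFac_prime (n := p.natAbs) (by omega)
  have hrd : (p.natAbs.minFac : Int) ∣ p := by
    have h1 : (p.natAbs.minFac : Int) ∣ (p.natAbs : Int) := Int.natCast_dvd_natCast.mpr (Nat.minFac_dvd _)
    rwa [Int.natAbs_of_nonneg (by omega)] at h1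
  have hge : p ≤ (p.natAbs.minFac : Int) := hmin _ (by exact_mod_cast hr.two_le) (hrd.trans hdvd)
  have hle : (p.natAbs.minFac : Int) ≤ p := by
    have := Nat.minFac_le (n := p.natAbs) (by omega)
    omega
  have : p.natAbs.minFac = p.natAbs := by omega
  rw [← this] at hnp
  exact hnp hr

theorem pvFac_exit (p n m : Int) (divs : List Int)
    (hp2 : 2 ≤ p) (hn : 0 < n) (hm : 0 < m) (hnpp : n < p * p)
    (hP4 : ∀ q, 2 ≤ q → q ∣ n → p ≤ q)
    (hP5 : ∀ q, Prime q → 0 < q → q ∣ m → q < p)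
    (hd : ∀ d, d ∈ divs ↔ 0 < d ∧ d ∣ m) (hnd : divs.Nodup) :
    (∀ d, (d ∈ if 1 < n then divs ++ divs.map (· * n) else divs) ↔ 0 < d ∧ d ∣ m * n) ∧
    (if 1 < n then divs ++ divs.map (· * n) else divs).Nodup := by
  by_cases h1n : 1 < n
  · have hnz : n ≠ 0 := by omega
    have hnprime : Prime n := by
      rw [Int.prime_iff_natAbs_prime]
      by_contra hnp
      have hna : 2 ≤ n.natAbs := by omega
      have hr := Nat.minFac_prime (n := n.natAbs) (by omega)
      have hrd : (n.natAbs.minFac : Int) ∣ n := by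
        have hx : (n.natAbs.minFac : Int) ∣ (n.natAbs : Int) := Int.natCast_dvd_natCast.mpr (Nat.minFac_dvd _)
        rwa [Int.natAbs_of_nonneg (by omega)] at hx
      have hge : p ≤ (n.natAbs.minFac : Int) := hP4 _ (by exact_mod_cast hr.two_le) hrd
      have hsq := Nat.minFac_sq_le_self (n := n.natAbs) (by omega) hnp
      have hsq' : (n.natAbs.minFac : Int) * (n.natAbs.minFac : Int) ≤ n := by
        have hx : ((n.natAbs.minFac ^ 2 : Nat) : Int) ≤ (n.natAbs : Int) := by exact_mod_cast hsq
        rw [Int.natAbs_of_nonneg (by omega)] at hx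
        push_cast at hx
        nlinarith
      nlinarith
    have hnm : ¬ n ∣ m :=
      fun h => absurd (hP4 n (by omega) dvd_rfl) (not_le.mpr (hP5 n hnprime (by omega) h))
    rw [if_pos h1n]
    constructor
    · intro d
      rw [List.mem_append, List.mem_map]
      constructor
      · rintro (hmem | ⟨e, hemem, rfl⟩)
        · obtain ⟨h0, hdvd⟩ := (hd d).mp hmem
          exact ⟨h0, hdvd.trans (Dvd.intro n rfl)⟩
        · obtain ⟨he0, hedvd⟩ := (hd e).mp hemem
          exact ⟨by positivity, mul_dvd_mul hedvd dvd_rfl⟩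
      · rintro ⟨h0, hdvd⟩
        by_cases hdn : n ∣ d
        · obtain ⟨e, rfl⟩ := hdn
          have he0 : 0 < e := by nlinarith
          have hedvd : e ∣ m := by
            rw [mul_comm m n] at hdvd
            exact (mul_dvd_mul_iff_left hnz).mp hdvd
          exact Or.inr ⟨e, (hd e).mpr ⟨he0, hedvd⟩, by ring⟩
        · have hcop : IsCoprime n d := hnprime.coprime_iff_not_dvd.mpr hdn
          exact Or.inl ((hd d).mpr ⟨h0, hcop.symm.dvd_of_dvd_mul_right hdvd⟩)
    · refine List.Nodup.append hnd (hnd.map fun x y hxy => mul_right_cancel₀ hnz hxy) ?_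
      intro a ha hamem
      obtain ⟨e, hemem, rfl⟩ := List.mem_map.mp hamem
      obtain ⟨he0, -⟩ := (hd e).mp hemem
      obtain ⟨-, hadvd⟩ := (hd _).mp ha
      exact hnm (dvd_trans (Dvd.intro_left e rfl) hadvd)
  · have hn1 : n = 1 := by omega
    rw [if_neg h1n, hn1, mul_one]
    exact ⟨hd, hnd⟩

theorem pvFac_spec_aux (M : Nat) : ∀ (p n : Int) (divs : List Int) (m : Int),
    n.toNat + 1 - p.toNat ≤ M → 2 ≤ p → 0 < n → 0 < m →
    (∀ q, 2 ≤ q → q ∣ n → p ≤ q) →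
    (∀ q, Prime q → 0 < q → q ∣ m → q < p) →
    (∀ d, d ∈ divs ↔ 0 < d ∧ d ∣ m) → divs.Nodup →
    (∀ d, d ∈ pvFac M p n divs ↔ 0 < d ∧ d ∣ m * n) ∧ (pvFac M p n divs).Nodup := by
  induction M with
  | zero =>
    intro p n divs m hM hp2 hn hm hP4 hP5 hd hnd
    have hpn : n < p := by omega
    have hnpp : n < p * p := by nlinarith
    simp only [pvFac]
    exact pvFac_exit p n m divs hp2 hn hm hnpp hP4 hP5 hd hnd
  | succ M ih =>
    intro p n divs m hM hp2 hn hm hP4 hP5 hd hnd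
    have hpz : p ≠ 0 := by omega
    by_cases hpp : p * p ≤ n
    · have hple : p ≤ n := by nlinarith
      simp only [pvFac, if_pos hpp]
      by_cases hmod : PySem.Int.mod n p = 0
      · rw [if_pos hmod]
        have hpn : p ∣ n := Int.dvd_of_fmod_eq_zero hmod
        have hpprime : Prime p := pvPrime_of_min p n hp2 hn hpn hP4
        have hpm : ¬ p ∣ m := fun h => absurd (hP5 p hpprime (by omega) h) (lt_irrefl p)
        have hd0 : ∀ d, d ∈ divs ↔ 0 < d ∧ d ∣ m * p ^ 0 := by
          intro d; rw [pow_zero, mul_one]; exact hd d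
        have hb0 : ∀ d, d ∈ divs ↔ ∃ e, 0 < e ∧ e ∣ m ∧ d = e * p ^ 0 := by
          intro d
          rw [hd d]
          constructor
          · rintro ⟨h0, hdvd⟩; exact ⟨d, h0, hdvd, by ring⟩
          · rintro ⟨e, he0, hedvd, rfl⟩; simpa using ⟨he0, hedvd⟩
        obtain ⟨k, hk1, hk2, hk3, hk4, hk5⟩ :=
          pvPump_spec p n divs divs m 0 hpprime hp2 hn hm hpm hd0 hb0 hnd hnd
        have hk1' : k ≠ 0 := by
          intro hk0
          rw [hk0, pow_zero, mul_one] at hk1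
          rw [hk1] at hk3
          exact hk3 hpn
        have hlt : (pvPump n.toNat p n divs divs).1 < n := by
          have hpk : p ≤ p ^ k := by
            calc p = p ^ 1 := (pow_one p).symm
              _ ≤ p ^ k := pow_le_pow_right₀ (by omega) (by omega)
          nlinarith
        have hrec := ih (p + 1) (pvPump n.toNat p n divs divs).1 (pvPump n.toNat p n divs divs).2 (m * p ^ k)
          (by omega) (by omega) hk2 (by positivity)
          (fun q hq2 hqdvd => by
            have hqn : q ∣ n := hqdvd.trans ⟨p ^ k, hk1.symm⟩
            have hge := hP4 q hq2 hqn
            rcases lt_or_eq_of_le hge with h | h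
            · omega
            · exact absurd (h ▸ hqdvd) hk3)
          (fun q hq hq0 hqdvd => by
            rcases hq.dvd_mul.mp hqdvd with h | h
            · exact lt_trans (hP5 q hq hq0 h) (by omega)
            · have hqp : q ∣ p := hq.dvd_of_dvd_pow h
              have hassoc := hq.associated_of_dvd hpprime hqp
              rcases Int.associated_iff.mp hassoc with h' | h'
              · omega
              · omega)
          (fun d => by have := hk4 d; simpa using this)
          hk5
        have hmn : m * n = m * p ^ k * (pvPump n.toNat p n divs divs).1 := by
          conv_lhs => rw [← hk1]
          ring
        show (∀ d, d ∈ pvFac M (p+1) (pvPump n.toNat p n divs divs).1 (pvPump n.toNat p n divs divs).2 ↔ 0 < d ∧ d ∣ m * n) ∧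
          (pvFac M (p+1) (pvPump n.toNat p n divs divs).1 (pvPump n.toNat p n divs divs).2).Nodup
        rw [hmn]
        exact hrec
      · rw [if_neg hmod]
        exact ih (p + 1) n divs m (by omega) (by omega) hn hm
          (fun q hq2 hqdvd => by
            have hge := hP4 q hq2 hqdvd
            rcases lt_or_eq_of_le hge with h | h
            · omega
            · exact absurd (Int.fmod_eq_zero_of_dvd (h ▸ hqdvd)) hmod)
          (fun q hq hq0 hqdvd => lt_trans (hP5 q hq hq0 hqdvd) (by omega))
          hd hnd
    · simp only [pvFac, if_neg hpp]
      exact pvFac_exit p n m divs hp2 hn hm (by omega) hP4 hP5 hd hnd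

theorem pvFac_spec (fuel : Nat) (p n : Int) (divs : List Int) (m : Int)
    (hfuel : n.toNat + 1 - p.toNat ≤ fuel) (hp2 : 2 ≤ p) (hn : 0 < n) (hm : 0 < m)
    (hP4 : ∀ q, 2 ≤ q → q ∣ n → p ≤ q)
    (hP5 : ∀ q, Prime q → 0 < q → q ∣ m → q < p)
    (hd : ∀ d, d ∈ divs ↔ 0 < d ∧ d ∣ m) (hnd : divs.Nodup) :
    (∀ d, d ∈ pvFac fuel p n divs ↔ 0 < d ∧ d ∣ m * n) ∧ (pvFac fuel p n divs).Nodup :=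
  pvFac_spec_aux fuel p n divs m hfuel hp2 hn hm hP4 hP5 hd hnd

theorem pvDivs_spec (area : Int) (h0 : 0 < area) :
    (∀ d, d ∈ pvFac (area.toNat + 1) 2 area [1] ↔ 0 < d ∧ d ∣ area) ∧
    (pvFac (area.toNat + 1) 2 area [1]).Nodup := by
  have h := pvFac_spec (area.toNat + 1) 2 area [1] 1 (by omega) (le_refl 2) h0 one_pos
    (fun q hq _ => hq)
    (fun q hq hq0 hdvd => absurd (isUnit_of_dvd_one hdvd) hq.not_unit)
    (fun d => by
      simp only [List.mem_singleton]
      constructor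
      · rintro rfl; exact ⟨one_pos, dvd_refl 1⟩
      · rintro ⟨hd0, hd1⟩; exact Int.eq_one_of_dvd_one (le_of_lt hd0) hd1)
    (List.nodup_singleton 1)
  rwa [one_mul] at h

theorem pvSorted2_eq_sorted (xs : List (Int × Int)) :
    PySem.List.sorted2 xs (·.1) (·.2) = PySem.List.sorted xs (fun q => (toLex (q.1, q.2) : Lex (Int × Int))) := by
  have hB : (fun a b : Int × Int => (decide (a.1 < b.1) || (!decide (b.1 < a.1) && decide (a.2 < b.2))))
      = fun a b : Int × Int => decide ((toLex (a.1, a.2) : Lex (Int × Int)) < toLex (b.1, b.2)) := by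
    funext a b
    by_cases h1 : a.1 < b.1 <;> by_cases h2 : b.1 < a.1 <;> by_cases h3 : a.2 < b.2 <;>
      simp [h1, h2, h3, Prod.Lex.lt_iff] <;> omega
  show List.foldl (fun acc x => PySem.List.insertBy
      (fun a b : Int × Int => (decide (a.1 < b.1) || (!decide (b.1 < a.1) && decide (a.2 < b.2)))) x acc) [] xs
    = List.foldl (fun acc x => PySem.List.insertBy
      (fun a b : Int × Int => decide ((toLex (a.1, a.2) : Lex (Int × Int)) < toLex (b.1, b.2))) x acc) [] xs
  rw [hB]

theorem pvSorted2_perm_eq (xs ys : List (Int × Int)) (h : xs.Perm ys) :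
    PySem.List.sorted2 xs (·.1) (·.2) = PySem.List.sorted2 ys (·.1) (·.2) := by
  rw [pvSorted2_eq_sorted, pvSorted2_eq_sorted]
  exact PySem.List.sorted_eq_sorted_of_perm xs ys _
    (fun a b hab => by
      have := congrArg (fun x => ofLex x) hab
      simpa [Prod.ext_iff] using this)
    h

-- ---- arithmetic helpers (shared) ----

theorem pvSqLe (area : Int) (h0 : 0 ≤ area) :
    ((Nat.sqrt area.toNat : Int)) * (Nat.sqrt area.toNat : Int) ≤ area := by
  have h := Nat.sqrt_le' area.toNat
  rw [pow_two] at h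
  have h1 : ((area.toNat : Int)) = area := Int.toNat_of_nonneg h0
  exact h1 ▸ (by exact_mod_cast h)

theorem pvLeLimit (area h : Int) (h0 : 0 ≤ area) (hh : 0 < h) (hsq : h * h ≤ area) :
    h ≤ (Nat.sqrt area.toNat : Int) := by
  have e1 : ((h.toNat : Int)) = h := Int.toNat_of_nonneg (le_of_lt hh)
  have e2 : ((area.toNat : Int)) = area := Int.toNat_of_nonneg h0
  have hle : h.toNat * h.toNat ≤ area.toNat := by
    have hx : ((h.toNat * h.toNat : Nat) : Int) ≤ ((area.toNat : Nat) : Int) := by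
      push_cast
      rw [e1, e2]
      exact hsq
    exact_mod_cast hx
  have := Nat.le_sqrt.mpr hle
  calc h = (h.toNat : Int) := e1.symm
    _ ≤ (Nat.sqrt area.toNat : Int) := by exact_mod_cast this

theorem pvDivExact (area h : Int) (hm : PySem.Int.mod area h = 0) :
    area = h * PySem.Int.floordiv area h := by
  have hd : h ∣ area := Int.dvd_of_fmod_eq_zero hm
  obtain ⟨c, rfl⟩ := hd
  by_cases hz : h = 0
  · subst hz; simp [PySem.Int.floordiv]
  · rw [PySem.Int.floordiv, Int.mul_fdiv_cancel_left _ hz]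

theorem pvLeFdiv (area h : Int) (h0 : 0 ≤ area) (h1 : 1 ≤ h)
    (h2 : h ≤ (Nat.sqrt area.toNat : Int)) (hm : PySem.Int.mod area h = 0) :
    h ≤ PySem.Int.floordiv area h := by
  have he := pvDivExact area h hm
  have hle := pvSqLe area h0
  nlinarith

theorem pvFdivFlip (area h : Int) (h0 : 0 < area) (hh : 0 < h) (hdvd : h ∣ area) :
    area = h * PySem.Int.floordiv area h ∧ 0 < PySem.Int.floordiv area h ∧
    (PySem.Int.floordiv area h) ∣ area ∧
    PySem.Int.floordiv area (PySem.Int.floordiv area h) = h := by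
  have he := pvDivExact area h (Int.fmod_eq_zero_of_dvd hdvd)
  have hc0 : 0 < PySem.Int.floordiv area h := by nlinarith
  refine ⟨he, hc0, Dvd.intro_left h he.symm, ?_⟩
  set c := PySem.Int.floordiv area h with hcdef
  have hcz : c ≠ 0 := by omega
  rw [he, mul_comm h c]
  exact Int.mul_fdiv_cancel_left _ hcz

-- ---- A-side loop reductions ----

theorem pvFoldWide (area : Int) (h0 : 0 ≤ area) :
    List.foldl
          (fun dims height =>
            if PySem.Int.mod area height ≠ 0 then dims
            else
              if PySem.Int.floordiv area height ≠ height then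
                if (classify_shape height (PySem.Int.floordiv area height) == "wide") = true then
                  (if (classify_shape (PySem.Int.floordiv area height) height == "wide") = true then
                      dims ++ [(height, PySem.Int.floordiv area height)]
                    else dims) ++
                    [(PySem.Int.floordiv area height, height)]
                else
                  if (classify_shape (PySem.Int.floordiv area height) height == "wide") = true then
                    dims ++ [(height, PySem.Int.floordiv area height)]
                  else dims
              else
                if (classify_shape (PySem.Int.floordiv area height) height == "wide") = true then
                  dims ++ [(height, PySem.Int.floordiv area height)]
                else dims)
          [] (PySem.List.pyRange 1 ((Nat.sqrt area.toNat : Int) + 1)) =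
    List.foldl
      (fun acc h => if PySem.Int.mod area h = 0 ∧ PySem.Int.floordiv area h ≠ h then
          acc ++ [(h, PySem.Int.floordiv area h)] else acc)
      [] (PySem.List.pyRange 1 ((Nat.sqrt area.toNat : Int) + 1)) := by
  apply PySem.List.foldl_congr_mem
  intro acc h hmem
  obtain ⟨h1, h2⟩ := PySem.List.mem_pyRange_one.mp hmem
  have h2' : h ≤ (Nat.sqrt area.toNat : Int) := by omega
  by_cases hm : PySem.Int.mod area h = 0
  · simp only [hm, ne_eq, not_true_eq_false, if_false]
    by_cases hw : PySem.Int.floordiv area h = h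
    · simp [hw, classify_shape]
    · have hlt : h < PySem.Int.floordiv area h :=
        lt_of_le_of_ne (pvLeFdiv area h h0 h1 h2' hm) (Ne.symm hw)
      have hne : h ≠ PySem.Int.floordiv area h := by omega
      have hnlt : ¬ PySem.Int.floordiv area h < h := by omega
      simp [classify_shape, hne, hnlt, hlt, hw]
  · simp [hm]

theorem pvFoldTall (area : Int) (h0 : 0 ≤ area) :
    List.foldl
          (fun dims height =>
            if PySem.Int.mod area height ≠ 0 then dims
            else
              if PySem.Int.floordiv area height ≠ height then
                if (classify_shape height (PySem.Int.floordiv area height) == "tall") = true then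
                  (if (classify_shape (PySem.Int.floordiv area height) height == "tall") = true then
                      dims ++ [(height, PySem.Int.floordiv area height)]
                    else dims) ++
                    [(PySem.Int.floordiv area height, height)]
                else
                  if (classify_shape (PySem.Int.floordiv area height) height == "tall") = true then
                    dims ++ [(height, PySem.Int.floordiv area height)]
                  else dims
              else
                if (classify_shape (PySem.Int.floordiv area height) height == "tall") = true then
                  dims ++ [(height, PySem.Int.floordiv area height)]
                else dims)
          [] (PySem.List.pyRange 1 ((Nat.sqrt area.toNat : Int) + 1)) =
    List.foldl
      (fun acc h => if PySem.Int.mod area h = 0 ∧ PySem.Int.floordiv area h ≠ h then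
          acc ++ [(PySem.Int.floordiv area h, h)] else acc)
      [] (PySem.List.pyRange 1 ((Nat.sqrt area.toNat : Int) + 1)) := by
  apply PySem.List.foldl_congr_mem
  intro acc h hmem
  obtain ⟨h1, h2⟩ := PySem.List.mem_pyRange_one.mp hmem
  have h2' : h ≤ (Nat.sqrt area.toNat : Int) := by omega
  by_cases hm : PySem.Int.mod area h = 0
  · simp only [hm, ne_eq, not_true_eq_false, if_false]
    by_cases hw : PySem.Int.floordiv area h = h
    · simp [hw, classify_shape]
    · have hlt : h < PySem.Int.floordiv area h :=
        lt_of_le_of_ne (pvLeFdiv area h h0 h1 h2' hm) (Ne.symm hw)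
      have hne : h ≠ PySem.Int.floordiv area h := by omega
      have hnlt : ¬ PySem.Int.floordiv area h < h := by omega
      simp [classify_shape, hne, hnlt, hlt, hw]
  · simp [hm]

theorem pvFoldSquare (area : Int) (h0 : 0 ≤ area) :
    List.foldl
          (fun dims height =>
            if PySem.Int.mod area height ≠ 0 then dims
            else
              if PySem.Int.floordiv area height ≠ height then
                if (classify_shape height (PySem.Int.floordiv area height) == "square") = true then
                  (if (classify_shape (PySem.Int.floordiv area height) height == "square") = true then
                      dims ++ [(height, PySem.Int.floordiv area height)]
                    else dims) ++
                    [(PySem.Int.floordiv area height, height)]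
                else
                  if (classify_shape (PySem.Int.floordiv area height) height == "square") = true then
                    dims ++ [(height, PySem.Int.floordiv area height)]
                  else dims
              else
                if (classify_shape (PySem.Int.floordiv area height) height == "square") = true then
                  dims ++ [(height, PySem.Int.floordiv area height)]
                else dims)
          [] (PySem.List.pyRange 1 ((Nat.sqrt area.toNat : Int) + 1)) =
    List.foldl
      (fun acc h => if PySem.Int.mod area h = 0 ∧ PySem.Int.floordiv area h = h then
          acc ++ [(h, PySem.Int.floordiv area h)] else acc)
      [] (PySem.List.pyRange 1 ((Nat.sqrt area.toNat : Int) + 1)) := by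
  apply PySem.List.foldl_congr_mem
  intro acc h hmem
  obtain ⟨h1, h2⟩ := PySem.List.mem_pyRange_one.mp hmem
  have h2' : h ≤ (Nat.sqrt area.toNat : Int) := by omega
  by_cases hm : PySem.Int.mod area h = 0
  · simp only [hm, ne_eq, not_true_eq_false, if_false]
    by_cases hw : PySem.Int.floordiv area h = h
    · simp [hw, classify_shape]
    · have hlt : h < PySem.Int.floordiv area h :=
        lt_of_le_of_ne (pvLeFdiv area h h0 h1 h2' hm) (Ne.symm hw)
      have hne : h ≠ PySem.Int.floordiv area h := by omega
      have hnlt : ¬ PySem.Int.floordiv area h < h := by omega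
      simp [classify_shape, hne, hnlt, hlt, hw]
  · simp [hm]

-- ---- the three shape cases ----

theorem pvCaseWide (area : Int) (h0 : 0 < area) :
    factor_dimensions area "wide" = factor_dimensions_alt area "wide" := by
  obtain ⟨hmem, hnd⟩ := pvDivs_spec area h0
  simp only [factor_dimensions, factor_dimensions_alt, if_neg (not_le.mpr h0)]
  rw [pvFoldWide area h0.le]
  simp only [show (("wide":String) == "square") = false by decide,
    show (("wide":String) == "wide") = true by decide, Bool.false_eq_true, if_false, if_true]
  rw [PySem.List.foldl_append_ite, List.nil_append]
  rw [PySem.Set.ofList_eq_self_of_nodup _ (List.Nodup.map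
    (fun a b hab => (Prod.ext_iff.mp hab).1)
    (List.Nodup.filter _ (PySem.List.nodup_pyRange_one 1 _)))]
  rw [PySem.List.foldl_append_ite, List.nil_append]
  apply pvSorted2_perm_eq
  refine (List.perm_ext_iff_of_nodup
    (List.Nodup.map (fun a b hab => (Prod.ext_iff.mp hab).1)
      (List.Nodup.filter _ (PySem.List.nodup_pyRange_one 1 _)))
    (List.Nodup.map (fun a b hab => (Prod.ext_iff.mp hab).1)
      (List.Nodup.filter _ hnd))).mpr ?_
  intro x
  simp only [List.mem_map, List.mem_filter, PySem.List.mem_pyRange_one, decide_eq_true_eq]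
  constructor
  · rintro ⟨h, ⟨⟨h1, h2⟩, hm, hne⟩, rfl⟩
    have h2' : h ≤ (Nat.sqrt area.toNat : Int) := by omega
    have hlt : h < PySem.Int.floordiv area h :=
      lt_of_le_of_ne (pvLeFdiv area h h0.le h1 h2' hm) (Ne.symm hne)
    exact ⟨h, ⟨(hmem h).mpr ⟨by omega, Int.dvd_of_fmod_eq_zero hm⟩, hlt⟩, rfl⟩
  · rintro ⟨h, ⟨hdmem, hlt⟩, rfl⟩
    obtain ⟨hh0, hhdvd⟩ := (hmem h).mp hdmem
    have hm : PySem.Int.mod area h = 0 := Int.fmod_eq_zero_of_dvd hhdvd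
    have he := pvDivExact area h hm
    have hle : h ≤ (Nat.sqrt area.toNat : Int) := pvLeLimit area h h0.le hh0 (by nlinarith)
    exact ⟨h, ⟨⟨by omega, by omega⟩, hm, by omega⟩, rfl⟩

theorem pvCaseTall (area : Int) (h0 : 0 < area) :
    factor_dimensions area "tall" = factor_dimensions_alt area "tall" := by
  obtain ⟨hmem, hnd⟩ := pvDivs_spec area h0
  simp only [factor_dimensions, factor_dimensions_alt, if_neg (not_le.mpr h0)]
  rw [pvFoldTall area h0.le]
  simp only [show (("tall":String) == "square") = false by decide,
    show (("tall":String) == "wide") = false by decide,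
    show (("tall":String) == "tall") = true by decide, Bool.false_eq_true, if_false, if_true]
  rw [PySem.List.foldl_append_ite, List.nil_append]
  rw [PySem.Set.ofList_eq_self_of_nodup _ (List.Nodup.map
    (fun a b hab => (Prod.ext_iff.mp hab).2)
    (List.Nodup.filter _ (PySem.List.nodup_pyRange_one 1 _)))]
  rw [PySem.List.foldl_append_ite, List.nil_append]
  apply pvSorted2_perm_eq
  refine (List.perm_ext_iff_of_nodup
    (List.Nodup.map (fun a b hab => (Prod.ext_iff.mp hab).2)
      (List.Nodup.filter _ (PySem.List.nodup_pyRange_one 1 _)))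
    (List.Nodup.map (fun a b hab => (Prod.ext_iff.mp hab).1)
      (List.Nodup.filter _ hnd))).mpr ?_
  intro x
  simp only [List.mem_map, List.mem_filter, PySem.List.mem_pyRange_one, decide_eq_true_eq]
  constructor
  · rintro ⟨h, ⟨⟨h1, h2⟩, hm, hne⟩, rfl⟩
    have h2' : h ≤ (Nat.sqrt area.toNat : Int) := by omega
    have hlt : h < PySem.Int.floordiv area h :=
      lt_of_le_of_ne (pvLeFdiv area h h0.le h1 h2' hm) (Ne.symm hne)
    obtain ⟨he, hw0, hwdvd, hflip⟩ := pvFdivFlip area h h0 (by omega) (Int.dvd_of_fmod_eq_zero hm)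
    refine ⟨PySem.Int.floordiv area h, ⟨(hmem _).mpr ⟨hw0, hwdvd⟩, by omega⟩, ?_⟩
    rw [hflip]
  · rintro ⟨d, ⟨hdmem, hlt⟩, rfl⟩
    obtain ⟨hd0, hddvd⟩ := (hmem d).mp hdmem
    obtain ⟨he, hw0, hwdvd, hflip⟩ := pvFdivFlip area d h0 hd0 hddvd
    set h := PySem.Int.floordiv area d with hh
    have hm : PySem.Int.mod area h = 0 := Int.fmod_eq_zero_of_dvd hwdvd
    have hle : h ≤ (Nat.sqrt area.toNat : Int) := pvLeLimit area h h0.le hw0 (by nlinarith)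
    refine ⟨h, ⟨⟨by omega, by omega⟩, hm, by omega⟩, ?_⟩
    rw [hflip]

theorem pvCaseSquare (area : Int) (h0 : 0 < area) :
    factor_dimensions area "square" = factor_dimensions_alt area "square" := by
  obtain ⟨hmem, hnd⟩ := pvDivs_spec area h0
  simp only [factor_dimensions, factor_dimensions_alt, if_neg (not_le.mpr h0)]
  rw [pvFoldSquare area h0.le]
  simp only [show (("square":String) == "square") = true by decide, if_true]
  rw [PySem.List.foldl_append_ite, List.nil_append]
  rw [PySem.Set.ofList_eq_self_of_nodup _ (List.Nodup.map
    (fun a b hab => (Prod.ext_iff.mp hab).1)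
    (List.Nodup.filter _ (PySem.List.nodup_pyRange_one 1 _)))]
  rw [PySem.List.foldl_congr_mem _ _
      (fun (acc : List (Int × Int)) h =>
        if h = PySem.Int.floordiv area h then acc ++ [(h, PySem.Int.floordiv area h)] else acc) []
      (fun acc x _ => by simp),
    PySem.List.foldl_append_ite, List.nil_append]
  apply pvSorted2_perm_eq
  refine (List.perm_ext_iff_of_nodup
    (List.Nodup.map (fun a b hab => (Prod.ext_iff.mp hab).1)
      (List.Nodup.filter _ (PySem.List.nodup_pyRange_one 1 _)))
    (List.Nodup.map (fun a b hab => (Prod.ext_iff.mp hab).1)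
      (List.Nodup.filter _ hnd))).mpr ?_
  intro x
  simp only [List.mem_map, List.mem_filter, PySem.List.mem_pyRange_one, decide_eq_true_eq]
  constructor
  · rintro ⟨h, ⟨⟨h1, h2⟩, hm, heq⟩, rfl⟩
    exact ⟨h, ⟨(hmem h).mpr ⟨by omega, Int.dvd_of_fmod_eq_zero hm⟩, heq.symm⟩, rfl⟩
  · rintro ⟨h, ⟨hdmem, heq⟩, rfl⟩
    obtain ⟨hh0, hhdvd⟩ := (hmem h).mp hdmem
    have hm : PySem.Int.mod area h = 0 := Int.fmod_eq_zero_of_dvd hhdvd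
    have he := pvDivExact area h hm
    have hle : h ≤ (Nat.sqrt area.toNat : Int) := pvLeLimit area h h0.le hh0 (by nlinarith)
    exact ⟨h, ⟨⟨by omega, by omega⟩, hm, heq.symm⟩, rfl⟩

theorem pvCaseOther (area : Int) (shape : String) (h0 : 0 < area)
    (hs : shape ≠ "square") (hw : shape ≠ "wide") (ht : shape ≠ "tall") :
    factor_dimensions area shape = factor_dimensions_alt area shape := by
  have hs' : ("square" == shape) = false := beq_eq_false_iff_ne.mpr (fun e => hs e.symm)
  have hw' : ("wide" == shape) = false := beq_eq_false_iff_ne.mpr (fun e => hw e.symm)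
  have ht' : ("tall" == shape) = false := beq_eq_false_iff_ne.mpr (fun e => ht e.symm)
  have hs2 : (shape == "square") = false := beq_eq_false_iff_ne.mpr hs
  have hw2 : (shape == "wide") = false := beq_eq_false_iff_ne.mpr hw
  have ht2 : (shape == "tall") = false := beq_eq_false_iff_ne.mpr ht
  simp only [factor_dimensions, factor_dimensions_alt, hs2, hw2, ht2,
    Bool.false_eq_true, if_false, if_neg (not_le.mpr h0)]
  have hcl : ∀ w h : Int, (classify_shape w h == shape) = false := by
    intro w h
    unfold classify_shape
    split_ifs
    · exact hs'
    · exact hw'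
    · exact ht'
  have hA : ∀ (acc : List (Int × Int)) (h : Int),
      (fun dims height =>
        if PySem.Int.mod area height ≠ 0 then dims
        else
          let width := PySem.Int.floordiv area height
          let dims := if classify_shape width height == shape then dims ++ [(height, width)] else dims
          if width ≠ height then
            if classify_shape height width == shape then dims ++ [(width, height)] else dims
          else dims) acc h = acc := by
    intro acc h
    by_cases hm : PySem.Int.mod area h = 0
    · simp [hm, hcl]
    · simp [hm]
  rw [PySem.List.foldl_congr_mem _ _ (fun acc _ => acc) [] (fun acc x _ => hA acc x),
    List.foldl_fixed]
  rw [PySem.List.foldl_congr_mem _ _ (fun acc _ => acc) [] ?_, List.foldl_fixed]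
  · rfl
  · intro acc x _
    simp

theorem pvCaseZero (shape : String) :
    factor_dimensions 0 shape = factor_dimensions_alt 0 shape := by
  have hr : PySem.List.pyRange 1 (((Nat.sqrt (0:Int).toNat : Int)) + 1) 1 = [] := by decide
  simp only [factor_dimensions, factor_dimensions_alt, hr, List.foldl_nil, if_pos (le_refl (0:Int))]
  rfl

-- ===== VERDICT (by name: the statement is the Claim_ definition above) =====
theorem factor_dimensions_spec : Claim_equal_factor_dimensions := by
  intro area shape _ hpre
  unfold Spec_factor_dimensions
  rcases lt_or_eq_of_le hpre with h0 | h0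
  · by_cases h1 : shape = "square"
    · rw [h1]; exact pvCaseSquare area h0
    by_cases h2 : shape = "wide"
    · rw [h2]; exact pvCaseWide area h0
    by_cases h3 : shape = "tall"
    · rw [h3]; exact pvCaseTall area h0
    exact pvCaseOther area shape h0 h1 h2 h3
  · rw [← h0]
    exact pvCaseZero shape
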